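-- pv_equiv track=rewrite | github.com/ta05/VarsityTutors | Python/Greyson/Recursion/recursive.py | appearances_helper
-- ===== SOURCE A (Python) =====
-- def appearances_helper(s: str, freq: dict[str, int], low: int, high: int) -> dict[str, int]:
--     if low > high:
--         return freq
--
--     if s[low] in freq:
--         freq[s[low]] += 1
--     else:
--         freq[s[low]] = 1
--
--     return appearances_helper(s, freq, low + 1, high)
-- ===== SOURCE B (Python) =====
-- def appearances_helper(s: str, freq: dict[str, int], low: int, high: int) -> dict[str, int]:
--     for i in range(low, high + 1):
--         freq[s[i]] = freq.get(s[i], 0) + 1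
--     return freq
-- ===== Notes on version B (the rewrite author's own statement) =====
-- stated objective: idiomatic
-- what changed: Replaces the tail-recursion and the contains/increment-vs-initialise branch with a single explicit loop over range(low, high+1) that does freq[s[i]] = freq.get(s[i], 0) + 1; per-index access is kept so out-of-range indices still raise.
import Mathlib
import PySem

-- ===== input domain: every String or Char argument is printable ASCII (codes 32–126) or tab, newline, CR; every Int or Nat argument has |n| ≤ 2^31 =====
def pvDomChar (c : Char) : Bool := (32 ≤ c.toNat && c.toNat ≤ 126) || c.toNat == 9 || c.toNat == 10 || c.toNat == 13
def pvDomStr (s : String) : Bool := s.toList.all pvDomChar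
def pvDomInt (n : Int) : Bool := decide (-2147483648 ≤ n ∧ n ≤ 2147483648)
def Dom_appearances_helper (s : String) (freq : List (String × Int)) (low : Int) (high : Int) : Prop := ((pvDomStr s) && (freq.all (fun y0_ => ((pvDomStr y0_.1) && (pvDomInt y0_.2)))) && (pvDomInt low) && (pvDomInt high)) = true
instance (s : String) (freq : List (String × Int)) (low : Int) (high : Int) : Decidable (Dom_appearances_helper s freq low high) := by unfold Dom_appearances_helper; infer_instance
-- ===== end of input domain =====

-- B replaces A's tail-recursion and its contains/increment-vs-initialise branch by one
-- explicit loop over range(low, high+1) using freq.get(c, 0) + 1 (idiomatic; same cost).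
-- Both A and B mutate the passed-in dict in place in the same way; the theorem is about
-- the returned value.


-- ===== PORT A =====
-- literal transliteration of A: if low > high return freq; else branch on `s[low] in freq`
-- (increment vs. initialise to 1) and tail-recurse on low+1.
def appearances_helper (s : String) (freq : List (String × Int)) (low : Int) (high : Int) : List (String × Int) :=
  if low > high then freq
  else
    match PySem.Str.pyGet? s low with
    | none => freq   -- IndexError in Python; excluded by Pre_
    | some c =>
      let d := PySem.Dict.mk freq
      let key := String.ofList [c]
      let d' := if d.contains key then d.modify key 0 (· + 1) else d.insert key 1
      appearances_helper s d'.items (low + 1) high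
termination_by (high + 1 - low).toNat
decreasing_by omega

-- ===== PORT B =====
-- literal transliteration of B: a fold over range(low, high+1) doing
-- freq[s[i]] = freq.get(s[i], 0) + 1.
def appearances_helper_alt (s : String) (freq : List (String × Int)) (low : Int) (high : Int) : List (String × Int) :=
  ((PySem.List.pyRange low (high + 1) 1).foldl
    (fun d i =>
      match PySem.Str.pyGet? s i with
      | none => d   -- IndexError in Python; excluded by Pre_
      | some c => d.insert (String.ofList [c]) (d.getD (String.ofList [c]) 0 + 1))
    (PySem.Dict.mk freq)).items

-- ===== PRECONDITION & SPEC =====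
-- Pre_ excludes exactly the inputs where Python raises IndexError: some index in
-- [low, high] is outside the valid Python index range of s.
def Pre_appearances_helper (s : String) (freq : List (String × Int)) (low : Int) (high : Int) : Prop :=
  high < low ∨ (-(s.toList.length : Int) ≤ low ∧ high < (s.toList.length : Int))
instance (s : String) (freq : List (String × Int)) (low : Int) (high : Int) : Decidable (Pre_appearances_helper s freq low high) := by unfold Pre_appearances_helper; infer_instance

def pvWitness_appearances_helper : String × (List (String × Int)) × Int × Int := ("abca", [("a", 1)], 0, 3)

def Spec_appearances_helper (s : String) (freq : List (String × Int)) (low : Int) (high : Int) (out : List (String × Int)) : Prop := out = appearances_helper_alt s freq low high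
instance (s : String) (freq : List (String × Int)) (low : Int) (high : Int) (out : List (String × Int)) : Decidable (Spec_appearances_helper s freq low high out) := by unfold Spec_appearances_helper; infer_instance

-- ===== CLAIM (what is proved, stated in full; the proofs are below) =====
def Claim_equal_appearances_helper : Prop := ∀ (s : String) (freq : List (String × Int)) (low : Int) (high : Int), Dom_appearances_helper s freq low high → Pre_appearances_helper s freq low high → Spec_appearances_helper s freq low high (appearances_helper s freq low high)

-- ===== LEMMAS AND PROOFS =====

-- A's branch (contains ? modify : insert 1) computes the same dict as B's
-- unconditional insert of get(k,0)+1.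
theorem step_eq (d : PySem.Dict String Int) (k : String) :
    (if d.contains k then d.modify k 0 (· + 1) else d.insert k 1)
      = d.insert k (d.getD k 0 + 1) := by
  by_cases h : d.contains k
  · simp [h, PySem.Dict.modify]
  · simp only [h, if_false, Bool.false_eq_true]
    rw [PySem.Dict.getD_of_not_contains d 0 (by simpa using h)]
    norm_num

theorem main_eq (s : String) (high : Int) :
    ∀ (n : Nat) (low : Int) (d : PySem.Dict String Int),
      (high + 1 - low).toNat = n →
      (∀ i : Int, low ≤ i → i ≤ high → (PySem.Str.pyGet? s i).isSome) →
      appearances_helper s d.items low high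
        = appearances_helper_alt s d.items low high := by
  intro n
  induction n with
  | zero =>
    intro low d hn _
    have hlt : high < low := by omega
    rw [appearances_helper, appearances_helper_alt]
    simp [hlt, PySem.List.pyRange_one_eq_nil (by omega : high + 1 ≤ low)]
  | succ n ih =>
    intro low d hn hok
    have hle : low ≤ high := by omega
    have hsome : (PySem.Str.pyGet? s low).isSome := hok low le_rfl hle
    obtain ⟨c, hc⟩ := Option.isSome_iff_exists.mp hsome
    rw [appearances_helper, appearances_helper_alt]
    simp only [not_lt.mpr hle, hc]
    rw [PySem.List.pyRange_one_cons (by omega : low < high + 1)]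
    simp only [List.foldl_cons, hc]
    rw [step_eq]
    have := ih (low + 1) (PySem.Dict.mk d.items |>.insert (String.ofList [c])
        ((PySem.Dict.mk d.items).getD (String.ofList [c]) 0 + 1)) (by omega)
        (fun i h1 h2 => hok i (by omega) h2)
    rw [appearances_helper_alt] at this
    exact this

-- ===== VERDICT (by name: the statement is the Claim_ definition above) =====
theorem appearances_helper_spec : Claim_equal_appearances_helper := by
  intro s freq low high _ hpre
  unfold Spec_appearances_helper
  have hok : ∀ i : Int, low ≤ i → i ≤ high → (PySem.Str.pyGet? s i).isSome := by
    intro i h1 h2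
    rcases hpre with h | ⟨ha, hb⟩
    · omega
    · rcases h : PySem.Str.pyGet? s i with _ | c
      · exfalso
        rw [PySem.Str.pyGet?_eq, PySem.Chars.pyGet?_eq_listPyGet?,
            PySem.List.pyGet?_eq_none_iff] at h
        exact h ⟨by omega, by omega⟩
      · simp
  exact main_eq s high (high + 1 - low).toNat low (PySem.Dict.mk freq) rfl hok
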